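-- pv_equiv track=rewrite | github.com/fabriziosalmi/versiontracker | web_app.py | categorize_projects
-- ===== SOURCE A (Python) =====
-- from typing import Dict, List, Any
--
-- def categorize_projects(releases: List[Dict]) -> Dict[str, int]:
--     """Categorize projects based on language and naming patterns."""
--     categories = {
--         'Web Development': 0,
--         'Data Science': 0,
--         'DevOps': 0,
--         'Mobile': 0,
--         'Desktop': 0,
--         'Libraries': 0,
--         'Tools': 0,
--         'Other': 0
--     }
--
--     for release in releases:
--         lang = (release.get('language') or '').lower()
--         name = release.get('repo_name', '').lower()
--
--         if any(term in name for term in ['web', 'site', 'html', 'css', 'js']) or lang in ['javascript', 'typescript', 'html', 'css']: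
--             categories['Web Development'] += 1
--         elif any(term in name for term in ['data', 'ml', 'ai', 'analysis']) or lang in ['python', 'r', 'jupyter notebook']:
--             categories['Data Science'] += 1
--         elif any(term in name for term in ['docker', 'k8s', 'deploy', 'ci', 'cd']) or lang in ['shell', 'dockerfile']:
--             categories['DevOps'] += 1
--         elif lang in ['swift', 'kotlin', 'java', 'dart']:
--             categories['Mobile'] += 1
--         elif lang in ['c++', 'c#', 'c', 'rust', 'go']:
--             categories['Desktop'] += 1
--         elif any(term in name for term in ['lib', 'sdk', 'api', 'framework']):
--             categories['Libraries'] += 1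
--         elif any(term in name for term in ['tool', 'cli', 'util', 'helper']):
--             categories['Tools'] += 1
--         else:
--             categories['Other'] += 1
--
--     return {k: v for k, v in categories.items() if v > 0}
-- ===== SOURCE B (Python) =====
-- # Staged-sieve rewrite: one filtering pass per category over a shrinking pool of
-- # normalized (language, name) pairs, instead of A's per-release if/elif chain
-- # over a pre-zeroed dict; 'Other' is whatever survives every sieve stage.
--
-- RULES = [
--     ('Web Development', ['web', 'site', 'html', 'css', 'js'],
--      ['javascript', 'typescript', 'html', 'css']),
--     ('Data Science', ['data', 'ml', 'ai', 'analysis'],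
--      ['python', 'r', 'jupyter notebook']),
--     ('DevOps', ['docker', 'k8s', 'deploy', 'ci', 'cd'],
--      ['shell', 'dockerfile']),
--     ('Mobile', [], ['swift', 'kotlin', 'java', 'dart']),
--     ('Desktop', [], ['c++', 'c#', 'c', 'rust', 'go']),
--     ('Libraries', ['lib', 'sdk', 'api', 'framework'], []),
--     ('Tools', ['tool', 'cli', 'util', 'helper'], []),
-- ]
--
--
-- def _sieve(rules, remaining):
--     if not rules:
--         return {'Other': len(remaining)} if remaining else {}
--     (cat, terms, langs), rest_rules = rules[0], rules[1:]
--     matched = [p for p in remaining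
--                if any(t in p[1] for t in terms) or p[0] in langs]
--     rest = [p for p in remaining
--             if not (any(t in p[1] for t in terms) or p[0] in langs)]
--     out = {cat: len(matched)} if matched else {}
--     out.update(_sieve(rest_rules, rest))
--     return out
--
--
-- def categorize_projects(releases):
--     pool = [((r.get('language') or '').lower(), r.get('repo_name', '').lower())
--             for r in releases]
--     return _sieve(RULES, pool)
-- ===== Notes on version B (the rewrite author's own statement) =====
-- stated objective: alternative
-- what changed: Replaces A's per-release if/elif classification loop by a staged sieve: one filtering pass per category over a shrinking pool of normalized (language, name) pairs, counting each stage's matches and leaving 'Other' as the final residue.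
import Mathlib
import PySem

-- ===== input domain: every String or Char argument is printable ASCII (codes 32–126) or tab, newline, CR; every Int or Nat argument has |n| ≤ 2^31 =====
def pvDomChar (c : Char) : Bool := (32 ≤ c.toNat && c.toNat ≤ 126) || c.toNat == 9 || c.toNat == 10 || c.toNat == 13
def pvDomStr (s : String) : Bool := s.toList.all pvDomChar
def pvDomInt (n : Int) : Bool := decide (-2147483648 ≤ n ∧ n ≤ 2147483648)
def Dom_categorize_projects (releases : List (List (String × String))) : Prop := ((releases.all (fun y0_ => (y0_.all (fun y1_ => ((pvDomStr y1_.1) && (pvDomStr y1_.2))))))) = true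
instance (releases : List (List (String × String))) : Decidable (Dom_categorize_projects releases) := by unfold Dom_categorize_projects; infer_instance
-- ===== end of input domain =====

-- B replaces the per-release if/elif chain by a staged per-category sieve over a shrinking pool; same O(n) cost ('alternative').

-- ===== PORT A =====
-- `release.get('language') or ''`: values are strings, and `s or ''` is `s` for s ≠ '' and '' for s = '',
-- i.e. exactly `(get? "language").getD ""` — identical in both cases.
def categorize_projects (releases : List (List (String × String))) : List (String × Int) :=
  let categories : PySem.Dict String Int := PySem.Dict.ofList
    [("Web Development", 0), ("Data Science", 0), ("DevOps", 0), ("Mobile", 0),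
     ("Desktop", 0), ("Libraries", 0), ("Tools", 0), ("Other", 0)]
  let final := releases.foldl (fun d release =>
    let lang := PySem.Str.lower (((PySem.Dict.mk release).get? "language").getD "")
    let name := PySem.Str.lower (((PySem.Dict.mk release).get? "repo_name").getD "")
    if (["web", "site", "html", "css", "js"].any (fun t => PySem.Str.isIn t name)
        || ["javascript", "typescript", "html", "css"].contains lang) then
      d.insert "Web Development" (d.getD "Web Development" 0 + 1)
    else if (["data", "ml", "ai", "analysis"].any (fun t => PySem.Str.isIn t name)
        || ["python", "r", "jupyter notebook"].contains lang) then
      d.insert "Data Science" (d.getD "Data Science" 0 + 1)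
    else if (["docker", "k8s", "deploy", "ci", "cd"].any (fun t => PySem.Str.isIn t name)
        || ["shell", "dockerfile"].contains lang) then
      d.insert "DevOps" (d.getD "DevOps" 0 + 1)
    else if ["swift", "kotlin", "java", "dart"].contains lang then
      d.insert "Mobile" (d.getD "Mobile" 0 + 1)
    else if ["c++", "c#", "c", "rust", "go"].contains lang then
      d.insert "Desktop" (d.getD "Desktop" 0 + 1)
    else if ["lib", "sdk", "api", "framework"].any (fun t => PySem.Str.isIn t name) then
      d.insert "Libraries" (d.getD "Libraries" 0 + 1)
    else if ["tool", "cli", "util", "helper"].any (fun t => PySem.Str.isIn t name) then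
      d.insert "Tools" (d.getD "Tools" 0 + 1)
    else
      d.insert "Other" (d.getD "Other" 0 + 1)) categories
  -- `{k: v for k, v in categories.items() if v > 0}`: the keys of `final` are distinct,
  -- so the comprehension's items list is exactly the filtered items list.
  final.items.filter (fun kv => decide (0 < kv.2))

-- ===== PORT B =====
def pvRulesB : List (String × List String × List String) :=
  [("Web Development", ["web", "site", "html", "css", "js"],
      ["javascript", "typescript", "html", "css"]),
   ("Data Science", ["data", "ml", "ai", "analysis"],
      ["python", "r", "jupyter notebook"]),
   ("DevOps", ["docker", "k8s", "deploy", "ci", "cd"],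
      ["shell", "dockerfile"]),
   ("Mobile", [], ["swift", "kotlin", "java", "dart"]),
   ("Desktop", [], ["c++", "c#", "c", "rust", "go"]),
   ("Libraries", ["lib", "sdk", "api", "framework"], []),
   ("Tools", ["tool", "cli", "util", "helper"], [])]

-- `_sieve`: each stage's dict key (its category, finally 'Other') is fresh w.r.t. the recursive
-- result's keys, so `out.update(_sieve(...))` is exactly list append on the items lists.
def pvSieve : List (String × List String × List String) → List (String × String) → List (String × Int)
  | [], remaining => if remaining.isEmpty then [] else [("Other", (remaining.length : Int))]
  | (cat, terms, langs) :: rest_rules, remaining =>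
      let matched := remaining.filter
        (fun p => terms.any (fun t => PySem.Str.isIn t p.2) || langs.contains p.1)
      let rest := remaining.filter
        (fun p => !(terms.any (fun t => PySem.Str.isIn t p.2) || langs.contains p.1))
      (if matched.isEmpty then [] else [(cat, (matched.length : Int))]) ++ pvSieve rest_rules rest

def categorize_projects_alt (releases : List (List (String × String))) : List (String × Int) :=
  let pool := releases.map (fun r =>
    (PySem.Str.lower (((PySem.Dict.mk r).get? "language").getD ""),
     PySem.Str.lower (((PySem.Dict.mk r).get? "repo_name").getD "")))
  pvSieve pvRulesB pool

-- ===== PRECONDITION & SPEC =====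
def Spec_categorize_projects (releases : List (List (String × String))) (out : List (String × Int)) : Prop := out = categorize_projects_alt releases
instance (releases : List (List (String × String))) (out : List (String × Int)) : Decidable (Spec_categorize_projects releases out) := by unfold Spec_categorize_projects; infer_instance

-- ===== CLAIM (what is proved, stated in full; the proofs are below) =====
def Claim_equal_categorize_projects : Prop := ∀ (releases : List (List (String × String))), Dom_categorize_projects releases → Spec_categorize_projects releases (categorize_projects releases)

-- ===== LEMMAS AND PROOFS =====

-- the canonical category order (A's dict keys = B's rule categories + 'Other')
def pvOrder : List String :=
  ["Web Development", "Data Science", "DevOps", "Mobile", "Desktop", "Libraries", "Tools", "Other"]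

-- a single rule's predicate on a normalized (lang, name) pair
def pvMatch (r : String × List String × List String) (p : String × String) : Bool :=
  r.2.1.any (fun t => PySem.Str.isIn t p.2) || r.2.2.contains p.1

-- first-match classification of a pair (proof-side characterization of A's chain)
def pvClassifyP : List (String × List String × List String) → (String × String) → String
  | [], _ => "Other"
  | r :: rs, p => if pvMatch r p then r.1 else pvClassifyP rs p

def pvNorm (release : List (String × String)) : String × String :=
  (PySem.Str.lower (((PySem.Dict.mk release).get? "language").getD ""),
   PySem.Str.lower (((PySem.Dict.mk release).get? "repo_name").getD ""))

def pvClassify (release : List (String × String)) : String :=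
  pvClassifyP pvRulesB (pvNorm release)

-- A's per-release if/elif step is "insert at the classified category"
lemma pv_step_eq :
    (fun (d : PySem.Dict String Int) (release : List (String × String)) =>
      let lang := PySem.Str.lower (((PySem.Dict.mk release).get? "language").getD "")
      let name := PySem.Str.lower (((PySem.Dict.mk release).get? "repo_name").getD "")
      if (["web", "site", "html", "css", "js"].any (fun t => PySem.Str.isIn t name)
          || ["javascript", "typescript", "html", "css"].contains lang) then
        d.insert "Web Development" (d.getD "Web Development" 0 + 1)
      else if (["data", "ml", "ai", "analysis"].any (fun t => PySem.Str.isIn t name)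
          || ["python", "r", "jupyter notebook"].contains lang) then
        d.insert "Data Science" (d.getD "Data Science" 0 + 1)
      else if (["docker", "k8s", "deploy", "ci", "cd"].any (fun t => PySem.Str.isIn t name)
          || ["shell", "dockerfile"].contains lang) then
        d.insert "DevOps" (d.getD "DevOps" 0 + 1)
      else if ["swift", "kotlin", "java", "dart"].contains lang then
        d.insert "Mobile" (d.getD "Mobile" 0 + 1)
      else if ["c++", "c#", "c", "rust", "go"].contains lang then
        d.insert "Desktop" (d.getD "Desktop" 0 + 1)
      else if ["lib", "sdk", "api", "framework"].any (fun t => PySem.Str.isIn t name) then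
        d.insert "Libraries" (d.getD "Libraries" 0 + 1)
      else if ["tool", "cli", "util", "helper"].any (fun t => PySem.Str.isIn t name) then
        d.insert "Tools" (d.getD "Tools" 0 + 1)
      else
        d.insert "Other" (d.getD "Other" 0 + 1))
    = fun d release => d.insert (pvClassify release) (d.getD (pvClassify release) 0 + 1) := by
  funext d release
  simp only [pvClassify, pvClassifyP, pvMatch, pvNorm, pvRulesB,
    List.any_nil, Bool.false_or, List.contains_nil, Bool.or_false]
  split_ifs <;> rfl

lemma pv_classifyP_mem (rs : List (String × List String × List String)) (p : String × String) :
    pvClassifyP rs p ∈ rs.map (·.1) ++ ["Other"] := by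
  induction rs with
  | nil => simp [pvClassifyP]
  | cons r rs ih =>
      simp only [pvClassifyP]
      split_ifs <;> simp_all

lemma pv_countP_drop_matched (q m : (String × String) → Bool)
    (h : ∀ a, m a = true → q a = false) (ps : List (String × String)) :
    ps.countP q = (ps.filter (fun a => !m a)).countP q := by
  induction ps with
  | nil => rfl
  | cons a ps ih =>
      by_cases hm : m a = true
      · simp [hm, h a hm, ih]
      · simp only [Bool.not_eq_true] at hm
        simp [hm, List.countP_cons, ih]

-- the sieve computes, per category in rule order, the number of pairs whose FIRST matching rule it is
lemma pv_sieve_canon (rs : List (String × List String × List String))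
    (hnd : (rs.map (·.1)).Nodup) (hoth : "Other" ∉ rs.map (·.1))
    (ps : List (String × String)) :
    pvSieve rs ps = (rs.map (·.1) ++ ["Other"]).filterMap (fun cat =>
      let n : Int := (ps.countP (fun p => pvClassifyP rs p == cat) : Int)
      if 0 < n then some (cat, n) else none) := by
  induction rs generalizing ps with
  | nil =>
      have hlen : ps.countP (fun p => (pvClassifyP [] p == "Other")) = ps.length := by
        simp [pvClassifyP]
      by_cases h : ps.isEmpty
      · have h0 : ps.length = 0 := by simpa [List.isEmpty_iff_length_eq_zero] using h
        simp [pvSieve, h, hlen, h0]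
      · have hpos : 0 < ps.length := by
          rcases Nat.eq_zero_or_pos ps.length with h0 | h0
          · exact absurd (by simpa [List.isEmpty_iff_length_eq_zero] using h0) h
          · exact h0
        simp [pvSieve, h, hlen, hpos]
  | cons r rs ih =>
      obtain ⟨cat, terms, langs⟩ := r
      simp only [List.map_cons, List.nodup_cons, List.mem_cons] at hnd hoth
      rw [not_or] at hoth
      obtain ⟨hcat_notin, hnd'⟩ := hnd
      obtain ⟨hcat_ne_other, hoth'⟩ := hoth
      -- head entry: classify to `cat` iff the head rule matches
      have hhead : ∀ p, (pvClassifyP ((cat, terms, langs) :: rs) p == cat)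
          = pvMatch (cat, terms, langs) p := by
        intro p
        by_cases hm : pvMatch (cat, terms, langs) p
        · simp [pvClassifyP, hm]
        · have hns : pvClassifyP rs p ≠ cat := by
            intro he
            have hmem := pv_classifyP_mem rs p
            rw [he] at hmem
            rcases List.mem_append.mp hmem with h1 | h1
            · exact hcat_notin h1
            · simp at h1; exact hcat_ne_other h1.symm
          simp [pvClassifyP, hm, hns]
      -- tail entries: counts over ps equal counts over the unmatched rest
      have htail : ∀ cat', cat' ≠ cat →
          ps.countP (fun p => pvClassifyP ((cat, terms, langs) :: rs) p == cat')
            = (ps.filter (fun p =>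
                !(terms.any (fun t => PySem.Str.isIn t p.2) || langs.contains p.1))).countP
                (fun p => pvClassifyP rs p == cat') := by
        intro cat' hne
        have hq : ∀ a, pvMatch (cat, terms, langs) a = true →
            (pvClassifyP ((cat, terms, langs) :: rs) a == cat') = false := by
          intro a ha
          simp [pvClassifyP, ha, hne.symm]
        rw [pv_countP_drop_matched
          (fun p => pvClassifyP ((cat, terms, langs) :: rs) p == cat')
          (fun a => pvMatch (cat, terms, langs) a) hq ps]
        apply List.countP_congr
        intro a ha
        rw [List.mem_filter] at ha
        have hm : pvMatch (cat, terms, langs) a = false := by simpa using ha.2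
        simp [pvClassifyP, hm]
      have hcnt_head : (ps.filter (fun p =>
            terms.any (fun t => PySem.Str.isIn t p.2) || langs.contains p.1)).length
          = ps.countP (fun p => pvClassifyP ((cat, terms, langs) :: rs) p == cat) := by
        rw [← List.countP_eq_length_filter]
        apply List.countP_congr
        intro a _
        rw [hhead a]
        rfl
      -- assemble
      simp only [pvSieve, List.map_cons, List.cons_append, List.filterMap_cons]
      rw [ih hnd' hoth']
      have hrest : ∀ cat' ∈ rs.map (·.1) ++ ["Other"],
          (fun c => (let n : Int := ((ps.filter (fun p =>
              !(terms.any (fun t => PySem.Str.isIn t p.2) || langs.contains p.1))).countP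
              (fun p => pvClassifyP rs p == c) : Int);
            if 0 < n then some (c, n) else none)) cat'
          = (fun c => (let n : Int := (ps.countP
              (fun p => pvClassifyP ((cat, terms, langs) :: rs) p == c) : Int);
            if 0 < n then some (c, n) else none)) cat' := by
        intro cat' hmem
        have hne : cat' ≠ cat := by
          rintro rfl
          rcases List.mem_append.mp hmem with h1 | h1
          · exact hcat_notin h1
          · simp at h1; exact hcat_ne_other h1.symm
        simp only [htail cat' hne]
      rw [List.filterMap_congr hrest]
      by_cases hm : (ps.filter (fun p =>
          terms.any (fun t => PySem.Str.isIn t p.2) || langs.contains p.1)).isEmpty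
      · have h0 : ps.countP (fun p => pvClassifyP ((cat, terms, langs) :: rs) p == cat) = 0 := by
          rw [← hcnt_head]
          exact List.isEmpty_iff_length_eq_zero.mp hm
        rw [if_pos hm]
        simp [h0]
      · have h0 : 0 < ps.countP (fun p => pvClassifyP ((cat, terms, langs) :: rs) p == cat) := by
          rw [← hcnt_head]
          rcases Nat.eq_zero_or_pos _ with h | h
          · exact absurd (List.isEmpty_iff_length_eq_zero.mpr h) hm
          · exact h
        rw [if_neg hm, hcnt_head]
        simp [h0]

lemma pv_filter_map_eq_filterMap (f : String → Int) (ks : List String) :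
    (ks.map (fun k => (k, f k))).filter (fun kv => decide (0 < kv.2))
      = ks.filterMap (fun k => let n := f k; if 0 < n then some (k, n) else none) := by
  induction ks with
  | nil => rfl
  | cons k ks ih =>
      simp only [List.map_cons, List.filter_cons, List.filterMap_cons]
      split_ifs with h <;> simp_all

lemma pv_getD_init (k : String) :
    (PySem.Dict.ofList
      [("Web Development", (0:Int)), ("Data Science", 0), ("DevOps", 0), ("Mobile", 0),
       ("Desktop", 0), ("Libraries", 0), ("Tools", 0), ("Other", 0)]).getD k 0 = 0 := by
  simp only [PySem.Dict.ofList, PySem.Dict.update, List.foldl_cons, List.foldl_nil,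
    PySem.Dict.getD_insert, PySem.Dict.getD_empty]
  split_ifs <;> rfl

-- A in canonical form: categories in order, with the count of releases classified there, zeros dropped
lemma pv_A_canon (releases : List (List (String × String))) :
    categorize_projects releases = pvOrder.filterMap (fun cat =>
      let n : Int := (((releases.map pvNorm).countP (fun p => pvClassifyP pvRulesB p == cat)) : Int)
      if 0 < n then some (cat, n) else none) := by
  simp only [categorize_projects]
  rw [pv_step_eq]
  simp only [← List.foldl_map (f := pvClassify)
    (g := fun (d : PySem.Dict String Int) c => d.insert c (d.getD c 0 + 1))]
  set l' : List String := releases.map pvClassify with hl'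
  set d0 : PySem.Dict String Int := PySem.Dict.ofList
    [("Web Development", 0), ("Data Science", 0), ("DevOps", 0), ("Mobile", 0),
     ("Desktop", 0), ("Libraries", 0), ("Tools", 0), ("Other", 0)] with hd0
  have hmem : ∀ c ∈ l', c ∈ pvOrder := by
    intro c hc
    obtain ⟨r, _, rfl⟩ := List.mem_map.mp hc
    have h := pv_classifyP_mem pvRulesB (pvNorm r)
    have he : pvRulesB.map (·.1) ++ ["Other"] = pvOrder := rfl
    rw [he] at h
    exact h
  have hk0 : d0.keys = pvOrder := by rw [hd0]; rfl
  have hkeys : (l'.foldl (fun d c => d.insert c (d.getD c 0 + 1)) d0).keys = pvOrder := by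
    rw [PySem.Dict.keys_foldl_insert, hk0, PySem.Set.update_eq_append_filter]
    have hnil : (PySem.Set.ofList l').filter (fun y => !(PySem.Set.contains pvOrder y)) = [] := by
      rw [List.filter_eq_nil_iff]
      intro a ha
      simp only [PySem.Set.mem_ofList] at ha
      have : a ∈ pvOrder := hmem a ha
      simp [pysem, this]
    rw [hnil, List.append_nil]
  have hnodup : (l'.foldl (fun d c => d.insert c (d.getD c 0 + 1)) d0).keys.Nodup := by
    rw [hkeys]; decide
  have hcnt : ∀ k, (l'.foldl (fun d c => d.insert c (d.getD c 0 + 1)) d0).getD k 0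
      = (l'.count k : Int) := by
    intro k
    rw [PySem.Dict.getD_foldl_insert_add_one, hd0, pv_getD_init, zero_add]
  rw [PySem.Dict.items_eq_map_keys _ hnodup 0, hkeys,
      List.map_congr_left (fun k _ => by rw [hcnt k] :
        ∀ k ∈ pvOrder, (k, (l'.foldl (fun d c => d.insert c (d.getD c 0 + 1)) d0).getD k 0)
          = (k, (l'.count k : Int)))]
  rw [pv_filter_map_eq_filterMap (fun k => (l'.count k : Int)) pvOrder]
  apply List.filterMap_congr
  intro c _
  have hc : l'.count c = (releases.map pvNorm).countP (fun p => pvClassifyP pvRulesB p == c) := by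
    rw [hl']
    have : releases.map pvClassify = (releases.map pvNorm).map (pvClassifyP pvRulesB) := by
      rw [List.map_map]; rfl
    rw [this, List.count, List.countP_map]
    rfl
  rw [hc]

-- ===== VERDICT (by name: the statement is the Claim_ definition above) =====
theorem categorize_projects_spec : Claim_equal_categorize_projects := by
  intro releases _
  show categorize_projects releases = categorize_projects_alt releases
  rw [pv_A_canon]
  simp only [categorize_projects_alt]
  rw [pv_sieve_canon pvRulesB (by decide) (by decide)]
  rfl
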